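-- pv_equiv track=rewrite | github.com/dattito/ml-journey | tokenizer_from_scratch/tokenizer.py | decode_mapping
-- ===== SOURCE A (Python) =====
-- def decode_mapping(mappings: dict[int, tuple[tuple[int, int], int]], i) -> list[int]:
--     decoded = mappings[i][0]
--     result = []
--     for e in decoded:
--         if e < 256:
--             result.append(e)
--         else:
--             result += decode_mapping(mappings, e)
--     return result
-- ===== SOURCE B (Python) =====
-- def decode_mapping(mappings: dict[int, tuple[tuple[int, int], int]], i) -> list[int]:
--     # Iterative DFS with an explicit stack instead of recursion; each byte is
--     # appended exactly once (no repeated list concatenation up the call tree).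
--     result = []
--     stack = [(i, False)]  # the seed is tagged non-byte: it is looked up even if i < 256
--     while stack:
--         val, is_byte = stack.pop()
--         if is_byte:
--             result.append(val)
--         else:
--             a, b = mappings[val][0]
--             stack.append((b, b < 256))
--             stack.append((a, a < 256))
--     return result
-- ===== Notes on version B (the rewrite author's own statement) =====
-- stated objective: alternative
-- what changed: The recursive descent with per-level list concatenation (result += decode_mapping(...)) is replaced by an iterative depth-first traversal over an explicit stack of (token, is_byte) pairs that appends each output byte exactly once.
import Mathlib
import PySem

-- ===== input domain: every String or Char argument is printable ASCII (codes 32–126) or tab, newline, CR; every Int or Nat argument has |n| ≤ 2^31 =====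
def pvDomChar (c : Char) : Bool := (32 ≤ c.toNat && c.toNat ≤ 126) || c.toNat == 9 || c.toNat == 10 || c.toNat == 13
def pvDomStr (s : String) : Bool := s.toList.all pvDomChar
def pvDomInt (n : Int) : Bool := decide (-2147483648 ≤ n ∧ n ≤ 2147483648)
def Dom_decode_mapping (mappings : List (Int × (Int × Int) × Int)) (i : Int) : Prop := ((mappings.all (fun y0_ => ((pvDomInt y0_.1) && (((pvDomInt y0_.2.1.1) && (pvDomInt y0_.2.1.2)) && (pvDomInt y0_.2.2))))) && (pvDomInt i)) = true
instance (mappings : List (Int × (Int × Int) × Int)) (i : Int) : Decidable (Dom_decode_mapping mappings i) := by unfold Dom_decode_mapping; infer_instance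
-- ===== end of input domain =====

-- B replaces A's recursion (which re-concatenates child results at every level) by an
-- explicit-stack iterative DFS that appends each byte once; equivalence is proved on the
-- inputs where A returns normally (Pre_ below excludes exactly those where A raises).

-- `mappings[i]` : Python dict lookup (first match on the association list); `none` = KeyError.
def pvLook (m : List (Int × (Int × Int) × Int)) (i : Int) : Option ((Int × Int) × Int) :=
  (PySem.Dict.mk m).get? i

-- the tokens a lookup of `a` recurses into (children ≥ 256)
def pvKids (m : List (Int × (Int × Int) × Int)) (a : Int) : List Int :=
  match pvLook m a with
  | none => []
  | some v => [v.1.1, v.1.2].filter (fun x => decide (256 ≤ x))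

-- one expansion step of the reachable-token set, and its saturation after m.length + 1 steps
def pvStep (m : List (Int × (Int × Int) × Int)) (s : Finset Int) : Finset Int :=
  s ∪ s.biUnion (fun k => (pvKids m k).toFinset)

def pvReach (m : List (Int × (Int × Int) × Int)) (i : Int) : Finset Int :=
  (pvStep m)^[m.length + 1] {i}

-- ===== PORT A =====
-- A is recursive with unbounded depth; the port carries fuel.  Under Pre_ every reachable
-- token is a key and no reachable cycle exists, so the recursion depth is bounded by the
-- number of reachable tokens ≤ m.length; fuel m.length + 1 is never exhausted under Pre_
-- (proved via decAfuel_stable).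
def decAfuel : Nat → List (Int × (Int × Int) × Int) → Int → List Int
  | 0, _, _ => []                       -- fuel guard, unreachable under Pre_
  | f + 1, m, i =>
    match pvLook m i with
    | none => []                        -- Python raises KeyError here; excluded by Pre_
    | some d =>
      -- result = []; for e in decoded: if e < 256: result.append(e) else result += decode_mapping(mappings, e)
      [d.1.1, d.1.2].foldl
        (fun result e => if e < 256 then result ++ [e] else result ++ decAfuel f m e) []

def decode_mapping (mappings : List (Int × (Int × Int) × Int)) (i : Int) : List Int :=
  decAfuel (mappings.length + 1) mappings i

-- ===== PORT B =====
-- while stack: pop (val, is_byte); append val if byte, else push the two children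
-- (tagged e < 256), second child first.  Fuel bounds the number of loop iterations;
-- under Pre_ at most 2^(m.length+2) - 1 iterations occur and the fuel is never
-- exhausted (proved via decBloop_run).
def decBloop : Nat → List (Int × (Int × Int) × Int) → List (Int × Bool) → List Int → List Int
  | _, _, [], result => result
  | 0, _, _ :: _, result => result      -- fuel guard, unreachable under Pre_
  | f + 1, m, (val, is_byte) :: stack, result =>
    if is_byte then decBloop f m stack (result ++ [val])
    else
      match pvLook m val with
      | none => result                  -- Python raises KeyError here; excluded by Pre_
      | some d =>
        decBloop f m
          ((d.1.1, decide (d.1.1 < 256)) :: (d.1.2, decide (d.1.2 < 256)) :: stack) result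

def decode_mapping_alt (mappings : List (Int × (Int × Int) × Int)) (i : Int) : List Int :=
  decBloop (2 ^ (mappings.length + 2)) mappings [(i, false)] []

-- ===== PRECONDITION & SPEC =====
-- Pre_ excludes exactly the inputs on which A raises: a KeyError (some token reachable from
-- i is looked up but missing from the table) or a RecursionError (a cycle among the tokens
-- reachable from i).  pvReach m i is the set of tokens A looks up starting from i.
def Pre_decode_mapping (mappings : List (Int × (Int × Int) × Int)) (i : Int) : Prop :=
  (∀ k ∈ pvReach mappings i, (pvLook mappings k).isSome = true) ∧
  (∀ k ∈ pvReach mappings i, ∀ c ∈ pvKids mappings k, k ∉ pvReach mappings c)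
instance (mappings : List (Int × (Int × Int) × Int)) (i : Int) : Decidable (Pre_decode_mapping mappings i) := by unfold Pre_decode_mapping; infer_instance

def pvWitness_decode_mapping : (List (Int × (Int × Int) × Int)) × Int :=
  ([(257, ((256, 65), 0)), (256, ((66, 67), 0))], 257)

def Spec_decode_mapping (mappings : List (Int × (Int × Int) × Int)) (i : Int) (out : List Int) : Prop := out = decode_mapping_alt mappings i
instance (mappings : List (Int × (Int × Int) × Int)) (i : Int) (out : List Int) : Decidable (Spec_decode_mapping mappings i out) := by unfold Spec_decode_mapping; infer_instance

-- ===== CLAIM (what is proved, stated in full; the proofs are below) =====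
def Claim_equal_decode_mapping : Prop := ∀ (mappings : List (Int × (Int × Int) × Int)) (i : Int), Dom_decode_mapping mappings i → Pre_decode_mapping mappings i → Spec_decode_mapping mappings i (decode_mapping mappings i)

-- ===== LEMMAS AND PROOFS =====

theorem look_mem {m : List (Int × (Int × Int) × Int)} {i : Int} {v} :
    pvLook m i = some v → (i, v) ∈ m := by
  induction m with
  | nil => intro h; simp [pvLook, PySem.Dict.get?] at h
  | cons e rest ih =>
    obtain ⟨k, w⟩ := e
    intro h
    rw [pvLook, PySem.Dict.get?_mk_cons] at h
    by_cases hk : k == i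
    · simp [hk] at h
      simp [eq_of_beq hk, ← h]
    · simp [hk] at h
      exact List.mem_cons_of_mem _ (ih h)

theorem sub_step (m : List (Int × (Int × Int) × Int)) (s : Finset Int) : s ⊆ pvStep m s :=
  Finset.subset_union_left

theorem step_mono {m : List (Int × (Int × Int) × Int)} {s t : Finset Int} (h : s ⊆ t) :
    pvStep m s ⊆ pvStep m t :=
  Finset.union_subset_union h (Finset.biUnion_subset_biUnion_of_subset_left _ h)

theorem iter_succ (m : List (Int × (Int × Int) × Int)) (n : Nat) (s : Finset Int) :
    (pvStep m)^[n + 1] s = pvStep m ((pvStep m)^[n] s) :=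
  Function.iterate_succ_apply' _ _ _

theorem iter_sub_succ (m : List (Int × (Int × Int) × Int)) (n : Nat) (s : Finset Int) :
    (pvStep m)^[n] s ⊆ (pvStep m)^[n + 1] s := by
  rw [iter_succ]; exact sub_step m _

theorem iter_mono_n (m : List (Int × (Int × Int) × Int)) {a b : Nat} (h : a ≤ b)
    (s : Finset Int) : (pvStep m)^[a] s ⊆ (pvStep m)^[b] s := by
  induction b with
  | zero => simp [Nat.le_zero.mp h]
  | succ b ih =>
    rcases Nat.lt_or_ge a (b + 1) with hb | hb
    · exact fun x hx => iter_sub_succ m b s (ih (by omega) hx)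
    · have : a = b + 1 := by omega
      subst this; exact fun x hx => hx

theorem mem_reach_self (m : List (Int × (Int × Int) × Int)) (i : Int) : i ∈ pvReach m i :=
  iter_mono_n m (Nat.zero_le _) {i} (by simp)

-- once an iterate repeats, it is a fixpoint
theorem iter_eq_propagate {m : List (Int × (Int × Int) × Int)} {s : Finset Int} {k : Nat}
    (h : (pvStep m)^[k] s = (pvStep m)^[k + 1] s) :
    ∀ j, k ≤ j → (pvStep m)^[j] s = (pvStep m)^[k] s := by
  intro j hj
  induction j with
  | zero => simp [Nat.le_zero.mp hj]
  | succ j ih =>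
    rcases Nat.lt_or_ge k (j + 1) with hb | hb
    · rw [iter_succ, ih (by omega), ← iter_succ, ← h]
    · have : k = j + 1 := by omega
      subst this; rfl

theorem card_grow {m : List (Int × (Int × Int) × Int)} {s : Finset Int} (hs : s.card = 1) :
    ∀ n : Nat, (∀ k < n, (pvStep m)^[k] s ≠ (pvStep m)^[k + 1] s) →
      n + 1 ≤ ((pvStep m)^[n] s).card := by
  intro n
  induction n with
  | zero => intro _; simp [hs]
  | succ n ih =>
    intro h
    have h1 := ih (fun k hk => h k (by omega))
    have hss : (pvStep m)^[n] s ⊂ (pvStep m)^[n + 1] s :=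
      Finset.ssubset_iff_subset_ne.mpr ⟨iter_sub_succ m n s, h n (by omega)⟩
    have := Finset.card_lt_card hss
    omega

-- every iterate from {i} sits inside pvReach m i
theorem iter_sub_reach (m : List (Int × (Int × Int) × Int)) (i : Int) {n : Nat}
    (h : n ≤ m.length + 1) : (pvStep m)^[n] {i} ⊆ pvReach m i :=
  iter_mono_n m h {i}

-- under Pre_'s first conjunct, pvReach m i is a fixpoint of pvStep
theorem reach_fixed {m : List (Int × (Int × Int) × Int)} {i : Int}
    (h1 : ∀ k ∈ pvReach m i, (pvLook m k).isSome = true) :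
    pvStep m (pvReach m i) = pvReach m i := by
  have hK : ∀ n ≤ m.length + 1, ((pvStep m)^[n] {i}).card ≤ m.length := by
    intro n hn
    have hsub : (pvStep m)^[n] {i} ⊆ (m.map Prod.fst).toFinset := by
      intro k hk
      have hk' := iter_sub_reach m i hn hk
      obtain ⟨v, hv⟩ := Option.isSome_iff_exists.mp (h1 k hk')
      have := look_mem hv
      simp only [List.mem_toFinset, List.mem_map]
      exact ⟨(k, v), this, rfl⟩
    calc ((pvStep m)^[n] {i}).card ≤ (m.map Prod.fst).toFinset.card := Finset.card_le_card hsub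
      _ ≤ (m.map Prod.fst).length := List.toFinset_card_le _
      _ = m.length := List.length_map ..
  by_cases hall : ∀ k < m.length + 1, (pvStep m)^[k] ({i} : Finset Int) ≠ (pvStep m)^[k + 1] {i}
  · have := card_grow (m := m) (s := {i}) (by simp) (m.length + 1) hall
    have := hK (m.length + 1) le_rfl
    omega
  · push Not at hall
    obtain ⟨k, hk, heq⟩ := hall
    have hfix := iter_eq_propagate heq
    have h1' : pvReach m i = (pvStep m)^[k] {i} := hfix (m.length + 1) (by omega)
    rw [pvReach] at *
    rw [h1', ← iter_succ, ← heq]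

theorem reach_closed {m : List (Int × (Int × Int) × Int)} {i : Int}
    (h1 : ∀ k ∈ pvReach m i, (pvLook m k).isSome = true)
    {k c : Int} (hk : k ∈ pvReach m i) (hc : c ∈ pvKids m k) : c ∈ pvReach m i := by
  have : c ∈ pvStep m (pvReach m i) := by
    refine Finset.mem_union_right _ (Finset.mem_biUnion.mpr ⟨k, hk, ?_⟩)
    simpa using hc
  rwa [reach_fixed h1] at this

-- anything reachable from a member stays inside pvReach m i
theorem reach_sub_reach {m : List (Int × (Int × Int) × Int)} {i : Int}
    (h1 : ∀ k ∈ pvReach m i, (pvLook m k).isSome = true)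
    {c : Int} (hc : c ∈ pvReach m i) : pvReach m c ⊆ pvReach m i := by
  have fix := reach_fixed h1
  have : ∀ n : Nat, (pvStep m)^[n] {c} ⊆ pvReach m i := by
    intro n
    induction n with
    | zero => simpa
    | succ n ih =>
      rw [iter_succ]
      exact fun x hx => fix ▸ step_mono ih hx
  exact this (m.length + 1)

-- children of a Pre_-admissible token are Pre_-admissible with strictly smaller reach
theorem child_facts {m : List (Int × (Int × Int) × Int)} {i : Int}
    (h : Pre_decode_mapping m i) {c : Int} (hc : c ∈ pvKids m i) :
    Pre_decode_mapping m c ∧ (pvReach m c).card < (pvReach m i).card := by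
  obtain ⟨h1, h2⟩ := h
  have hcR : c ∈ pvReach m i := reach_closed h1 (mem_reach_self m i) hc
  have hsub : pvReach m c ⊆ pvReach m i := reach_sub_reach h1 hcR
  have hni : i ∉ pvReach m c := h2 i (mem_reach_self m i) c hc
  refine ⟨⟨fun k hk => h1 k (hsub hk), fun k hk => h2 k (hsub hk)⟩, ?_⟩
  exact Finset.card_lt_card (Finset.ssubset_iff_subset_ne.mpr
    ⟨hsub, fun he => hni (he ▸ mem_reach_self m i)⟩)

theorem kid_mem_left {m : List (Int × (Int × Int) × Int)} {i : Int} {v}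
    (hv : pvLook m i = some v) (h : 256 ≤ v.1.1) : v.1.1 ∈ pvKids m i := by
  simp [pvKids, hv, h]

theorem kid_mem_right {m : List (Int × (Int × Int) × Int)} {i : Int} {v}
    (hv : pvLook m i = some v) (h : 256 ≤ v.1.2) : v.1.2 ∈ pvKids m i := by
  simp [pvKids, hv, h]

theorem reach_card_le {m : List (Int × (Int × Int) × Int)} {i : Int}
    (h1 : ∀ k ∈ pvReach m i, (pvLook m k).isSome = true) :
    (pvReach m i).card ≤ m.length := by
  have hsub : pvReach m i ⊆ (m.map Prod.fst).toFinset := by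
    intro k hk
    obtain ⟨v, hv⟩ := Option.isSome_iff_exists.mp (h1 k hk)
    have := look_mem hv
    simp only [List.mem_toFinset, List.mem_map]
    exact ⟨(k, v), this, rfl⟩
  calc (pvReach m i).card ≤ (m.map Prod.fst).toFinset.card := Finset.card_le_card hsub
    _ ≤ (m.map Prod.fst).length := List.toFinset_card_le _
    _ = m.length := List.length_map ..

-- any fuel above the reach-count computes the same value
theorem decAfuel_stable {m : List (Int × (Int × Int) × Int)} :
    ∀ n : Nat, ∀ i : Int, Pre_decode_mapping m i → (pvReach m i).card ≤ n →
      ∀ f g : Nat, n < f → n < g → decAfuel f m i = decAfuel g m i := by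
  intro n
  induction n using Nat.strong_induction_on with
  | _ n ih =>
    intro i hpre hnu f g hf hg
    obtain ⟨f, rfl⟩ : ∃ f', f = f' + 1 := ⟨f - 1, by omega⟩
    obtain ⟨g, rfl⟩ : ∃ g', g = g' + 1 := ⟨g - 1, by omega⟩
    obtain ⟨v, hv⟩ := Option.isSome_iff_exists.mp (hpre.1 i (mem_reach_self m i))
    simp only [decAfuel, hv, List.foldl, List.nil_append]
    have rec_eq : ∀ a : Int, 256 ≤ a → a ∈ pvKids m i →
        decAfuel f m a = decAfuel g m a := by
      intro a _ hak
      obtain ⟨hpa, hlt⟩ := child_facts hpre hak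
      exact ih (pvReach m a).card (by omega) a hpa le_rfl f g (by omega) (by omega)
    have r1 : ¬ v.1.1 < 256 → decAfuel f m v.1.1 = decAfuel g m v.1.1 := fun h =>
      rec_eq _ (by omega) (kid_mem_left hv (by omega))
    have r2 : ¬ v.1.2 < 256 → decAfuel f m v.1.2 = decAfuel g m v.1.2 := fun h =>
      rec_eq _ (by omega) (kid_mem_right hv (by omega))
    by_cases h1 : v.1.1 < 256 <;> by_cases h2 : v.1.2 < 256
    · simp [h1, h2]
    · simp [h1, h2, r2 h2]
    · simp [h1, h2, r1 h1]
    · simp [h1, h2, r1 h1, r2 h2]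

-- one-step characterisation of A's value on Pre_-admissible inputs
theorem decode_mapping_unfold {m : List (Int × (Int × Int) × Int)} {i : Int}
    (hpre : Pre_decode_mapping m i) {v} (hv : pvLook m i = some v) :
    decode_mapping m i =
      (if v.1.1 < 256 then [v.1.1] else decode_mapping m v.1.1) ++
      (if v.1.2 < 256 then [v.1.2] else decode_mapping m v.1.2) := by
  rw [decode_mapping]
  simp only [decAfuel, hv, List.foldl, List.nil_append]
  have fix : ∀ a : Int, 256 ≤ a → a ∈ pvKids m i →
      decAfuel (m.length) m a = decode_mapping m a := by
    intro a _ hak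
    obtain ⟨hpa, hlt⟩ := child_facts hpre hak
    have hle : (pvReach m i).card ≤ m.length := reach_card_le hpre.1
    exact decAfuel_stable (pvReach m a).card a hpa le_rfl m.length (m.length + 1)
      (by omega) (by omega)
  have r1 : ¬ v.1.1 < 256 → decAfuel m.length m v.1.1 = decode_mapping m v.1.1 := fun h =>
    fix _ (by omega) (kid_mem_left hv (by omega))
  have r2 : ¬ v.1.2 < 256 → decAfuel m.length m v.1.2 = decode_mapping m v.1.2 := fun h =>
    fix _ (by omega) (kid_mem_right hv (by omega))
  by_cases h1 : v.1.1 < 256 <;> by_cases h2 : v.1.2 < 256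
  · simp [h1, h2]
  · simp [h1, h2, r2 h2]
  · simp [h1, h2, r1 h1]
  · simp [h1, h2, r1 h1, r2 h2]

theorem decBloop_nil (f : Nat) (m : List (Int × (Int × Int) × Int)) (res : List Int) :
    decBloop f m [] res = res := by cases f <;> rfl

-- popping a non-byte seed consumes some fuel c and appends exactly A's value
theorem decBloop_run {m : List (Int × (Int × Int) × Int)} :
    ∀ n : Nat, ∀ i : Int, Pre_decode_mapping m i → (pvReach m i).card ≤ n →
      ∃ c : Nat, 1 ≤ c ∧ c ≤ 2 ^ (n + 2) - 1 ∧
        ∀ f : Nat, ∀ st : List (Int × Bool), ∀ res : List Int, c ≤ f →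
          decBloop f m ((i, false) :: st) res =
            decBloop (f - c) m st (res ++ decode_mapping m i) := by
  intro n
  induction n using Nat.strong_induction_on with
  | _ n ih =>
    intro i hpre hnu
    obtain ⟨v, hv⟩ := Option.isSome_iff_exists.mp (hpre.1 i (mem_reach_self m i))
    -- cost/effect of one pushed child
    have child : ∀ a : Int, (256 ≤ a → a ∈ pvKids m i) →
        ∃ w : Nat, 1 ≤ w ∧ w ≤ 2 ^ (n + 1) - 1 ∧
          ∀ f st res, w ≤ f →
            decBloop f m ((a, decide (a < 256)) :: st) res =
              decBloop (f - w) m st (res ++ (if a < 256 then [a] else decode_mapping m a)) := by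
      intro a ha
      by_cases hb : a < 256
      · refine ⟨1, le_rfl, ?_, ?_⟩
        · have h21 : (2 : Nat) ≤ 2 ^ (n + 1) := by
            simpa using Nat.pow_le_pow_right (by norm_num) (show 1 ≤ n + 1 by omega)
          omega
        intro f st res hf
        obtain ⟨f, rfl⟩ : ∃ f', f = f' + 1 := ⟨f - 1, by omega⟩
        simp [decBloop, hb]
      · have h256 : 256 ≤ a := by omega
        obtain ⟨hpa, hlt⟩ := child_facts hpre (ha h256)
        obtain ⟨w, hw1, hw2, hw⟩ := ih (pvReach m a).card (by omega) a hpa le_rfl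
        refine ⟨w, hw1, ?_, ?_⟩
        · have : (2 : Nat) ^ ((pvReach m a).card + 2) ≤ 2 ^ (n + 1) :=
            Nat.pow_le_pow_right (by norm_num) (by omega)
          omega
        · intro f st res hf
          simpa [hb] using hw f st res hf
    obtain ⟨wa, hwa1, hwa2, hwa⟩ := child v.1.1 (fun h => kid_mem_left hv h)
    obtain ⟨wb, hwb1, hwb2, hwb⟩ := child v.1.2 (fun h => kid_mem_right hv h)
    refine ⟨1 + wa + wb, by omega, ?_, ?_⟩
    · have : (1 : Nat) ≤ 2 ^ (n + 1) := Nat.one_le_two_pow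
      have h2 : (2 : Nat) ^ (n + 2) = 2 ^ (n + 1) + 2 ^ (n + 1) := by ring
      omega
    · intro f st res hf
      obtain ⟨f, rfl⟩ : ∃ f', f = f' + 1 := ⟨f - 1, by omega⟩
      simp only [decBloop, hv, Bool.false_eq_true, if_false]
      rw [hwa f ((v.1.2, decide (v.1.2 < 256)) :: st) res (by omega)]
      rw [hwb (f - wa) st _ (by omega)]
      rw [List.append_assoc, ← decode_mapping_unfold hpre hv]
      congr 1
      omega

-- ===== VERDICT (by name: the statement is the Claim_ definition above) =====
theorem decode_mapping_spec : Claim_equal_decode_mapping := by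
  intro m i _hDom hpre
  unfold Spec_decode_mapping decode_mapping_alt
  obtain ⟨c, hc1, hc2, hrun⟩ := decBloop_run m.length i hpre (reach_card_le hpre.1)
  have hfuel : c ≤ 2 ^ (m.length + 2) := by omega
  rw [hrun _ [] [] hfuel, decBloop_nil, List.nil_append]
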